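-- pv_equiv track=rewrite | github.com/YuanzhongLi/Practice_Competitive_Programming_Python | LeetCode/problems/1048.py | check
-- ===== SOURCE A (Python) =====
-- def check(w1, w2): # chain: w1->w2 bool
--     n1 = len(w1); n2 = len(w2)
--     if n1 + 1 == n2:
--         i1 = 0; i2 = 0
--         skip = False
--         while i1 < n1:
--             if w1[i1] == w2[i2]:
--                 i1 += 1; i2 += 1
--             else:
--                 if not skip:
--                     i2 += 1
--                     skip = True
--                 else:
--                     return False
--         return True
--     else: return False
-- ===== SOURCE B (Python) =====
-- def check(w1, w2): # chain: w1->w2 bool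
--     n1 = len(w1); n2 = len(w2)
--     return n1 + 1 == n2 and any(w2[:i] + w2[i+1:] == w1 for i in range(n2))
-- ===== Notes on version B (the rewrite author's own statement) =====
-- stated objective: simpler
-- what changed: Replaces the two-pointer skip-flag scan with the insertion/deletion duality: keep the length guard and test whether deleting any single character of w2 yields w1.
import Mathlib
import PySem

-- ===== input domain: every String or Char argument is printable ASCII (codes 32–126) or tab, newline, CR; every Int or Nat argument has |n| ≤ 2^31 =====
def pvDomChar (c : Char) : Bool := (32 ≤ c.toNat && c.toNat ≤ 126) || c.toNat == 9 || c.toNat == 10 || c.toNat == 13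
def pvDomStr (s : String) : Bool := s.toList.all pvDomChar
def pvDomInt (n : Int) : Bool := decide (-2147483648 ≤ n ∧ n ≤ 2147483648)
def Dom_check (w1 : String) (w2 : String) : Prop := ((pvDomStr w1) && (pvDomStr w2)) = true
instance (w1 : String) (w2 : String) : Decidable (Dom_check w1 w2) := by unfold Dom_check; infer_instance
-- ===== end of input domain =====

-- B replaces A's two-pointer skip-flag scan by the deletion duality (does deleting one char of w2 give w1?): simpler, not faster.

-- ===== PORT A =====
-- the two-pointer while loop as structural recursion on the two lists; `skip` is the flag.
-- The `_ :: _, []` case is unreachable under A's length guard (i2 ≤ i1 + 1 < n2 while the loop runs).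
def checkGo : List Char → List Char → Bool → Bool
  | [], _, _ => true
  | _ :: _, [], _ => false
  | a :: xs, b :: ys, skip =>
    if a = b then checkGo xs ys skip
    else if skip = false then checkGo (a :: xs) ys true
    else false

def check (w1 : String) (w2 : String) : Bool :=
  let l1 := w1.toList
  let l2 := w2.toList
  if l1.length + 1 = l2.length then checkGo l1 l2 false else false

-- ===== PORT B =====
-- w2[:i] + w2[i+1:]
def delCand (l : List Char) (i : Nat) : List Char := l.take i ++ l.drop (i + 1)

def check_alt (w1 : String) (w2 : String) : Bool :=
  let l1 := w1.toList
  let l2 := w2.toList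
  (l1.length + 1 == l2.length) && (List.range l2.length).any (fun i => delCand l2 i == l1)

-- ===== PRECONDITION & SPEC =====
def Spec_check (w1 : String) (w2 : String) (out : Bool) : Prop := out = check_alt w1 w2
instance (w1 : String) (w2 : String) (out : Bool) : Decidable (Spec_check w1 w2 out) := by unfold Spec_check; infer_instance

-- ===== CLAIM (what is proved, stated in full; the proofs are below) =====
def Claim_equal_check : Prop := ∀ (w1 : String) (w2 : String), Dom_check w1 w2 → Spec_check w1 w2 (check w1 w2)

-- ===== LEMMAS AND PROOFS =====

-- with skip already used, the scan is a prefix test; with equal lengths, equality.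
theorem checkGo_true_eq (xs ys : List Char) (h : xs.length = ys.length) :
    checkGo xs ys true = (xs == ys) := by
  induction xs generalizing ys with
  | nil =>
    cases ys with
    | nil => simp [checkGo]
    | cons b ys' => simp at h
  | cons a xs' ih =>
    cases ys with
    | nil => simp at h
    | cons b ys' =>
      simp only [List.length_cons, Nat.add_right_cancel_iff] at h
      by_cases hab : a = b
      · subst hab
        simp [checkGo, ih ys' h]
      · simp [checkGo, hab]

theorem checkGo_false_eq (xs ys : List Char) (h : xs.length + 1 = ys.length) :
    checkGo xs ys false = (List.range ys.length).any (fun i => delCand ys i == xs) := by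
  induction xs generalizing ys with
  | nil =>
    cases ys with
    | nil => simp at h
    | cons b ys' =>
      simp only [List.length_cons, Nat.add_right_cancel_iff, List.length_nil] at h
      have : ys' = [] := List.eq_nil_of_length_eq_zero h.symm
      subst this
      simp [checkGo, delCand, List.range_succ]
  | cons a xs' ih =>
    cases ys with
    | nil => simp at h
    | cons b ys' =>
      simp only [List.length_cons, Nat.add_right_cancel_iff] at h
      have hrange : (List.range (ys'.length + 1)).any (fun i => delCand (b :: ys') i == (a :: xs'))
          = ((delCand (b :: ys') 0 == (a :: xs'))
            || (List.range ys'.length).any (fun j => delCand (b :: ys') (j + 1) == (a :: xs'))) := by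
        rw [List.range_succ_eq_map]
        simp only [List.any_cons, List.any_map, Function.comp_def]
      have hd0 : delCand (b :: ys') 0 = ys' := by simp [delCand]
      have hdS : ∀ j, delCand (b :: ys') (j + 1) = b :: delCand ys' j := by
        intro j; simp [delCand]
      by_cases hab : a = b
      · subst hab
        have hloop : checkGo (a :: xs') (a :: ys') false = checkGo xs' ys' false := by
          simp [checkGo]
        rw [hloop, ih ys' h]
        simp only [List.length_cons]
        rw [hrange, hd0]
        simp only [hdS, List.cons_beq_cons, beq_self_eq_true, Bool.true_and]
        -- absorb the i = 0 disjunct: if ys' = a :: xs', deleting index 0 of ys' gives xs'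
        by_cases hy : ys' = a :: xs'
        · subst hy
          simp only [List.length_cons]
          have hw : (List.range (xs'.length + 1)).any (fun j => delCand (a :: xs') j == xs') = true :=
            List.any_eq_true.mpr ⟨0, by simp, by simp [delCand]⟩
          rw [hw]
          simp
        · have : (ys' == a :: xs') = false := by simp [hy]
          simp [this]
      · have hloop : checkGo (a :: xs') (b :: ys') false = checkGo (a :: xs') ys' true := by
          simp [checkGo, hab]
        have hlen : (a :: xs').length = ys'.length := by simp [← h]
        rw [hloop, checkGo_true_eq _ _ hlen]
        simp only [List.length_cons]
        rw [hrange, hd0]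
        simp only [hdS, List.cons_beq_cons]
        have hba : (b == a) = false := beq_eq_false_iff_ne.mpr (fun hh => hab hh.symm)
        simp [hba, BEq.comm]

-- ===== VERDICT (by name: the statement is the Claim_ definition above) =====
theorem check_spec : Claim_equal_check := by
  unfold Claim_equal_check
  intro w1 w2 _
  show check w1 w2 = check_alt w1 w2
  simp only [check, check_alt]
  by_cases h : w1.toList.length + 1 = w2.toList.length
  · have hb : (w1.toList.length + 1 == w2.toList.length) = true := beq_iff_eq.mpr h
    rw [if_pos h, hb, Bool.true_and, checkGo_false_eq _ _ h]
  · have hb : (w1.toList.length + 1 == w2.toList.length) = false := beq_eq_false_iff_ne.mpr h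
    rw [if_neg h, hb, Bool.false_and]
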